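-- pv_equiv track=rewrite | github.com/vosslab/biology-problems | inheritance-problems/genemaplib.py | generate_genotypes
-- ===== SOURCE A (Python) =====
-- def generate_genotypes(gene_letters: str) -> list:
-- 	"""
-- 	Generate all possible genotypes for a given string of gene letters.
--
-- 	Parameters
-- 	----------
-- 	gene_letters : str
-- 		A string containing gene letter identifiers.
--
-- 	Returns
-- 	-------
-- 	list
-- 		A list of tuples, each containing a pair representing the genotype.
--
-- 	Examples
-- 	--------
-- 	>>> generate_genotypes('abc')
-- 	['+++', '++c', '+b+', '+bc', 'a++', 'a+c', 'ab+', 'abc']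
-- 	"""
-- 	genotypes = []
-- 	num_genes = len(gene_letters)
-- 	for i in range(2**num_genes):
-- 		# Generate a binary representation of i, then pad it with zeros
-- 		binary_repr = bin(i)[2:].zfill(num_genes)
-- 		genotype = ''.join(gene_letters[j] if bit == '1' else '+' for j, bit in enumerate(binary_repr))
-- 		genotypes.append(genotype)
-- 	return genotypes
-- ===== SOURCE B (Python) =====
-- def generate_genotypes(gene_letters: str) -> list:
-- 	"""Generate all possible genotypes for a given string of gene letters.
--
-- 	Odometer approach: keep a boolean mask over the genes and step it in place
-- 	like a binary counter (rightmost position first), emitting the genotype for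
-- 	the current mask before each increment; stop when the counter rolls over.
-- 	"""
-- 	n = len(gene_letters)
-- 	bits = [False] * n
-- 	genotypes = []
-- 	while True:
-- 		genotypes.append(''.join(c if b else '+' for c, b in zip(gene_letters, bits)))
-- 		j = n - 1
-- 		while j >= 0 and bits[j]:
-- 			bits[j] = False
-- 			j -= 1
-- 		if j < 0:
-- 			return genotypes
-- 		bits[j] = True
-- ===== Notes on version B (the rewrite author's own statement) =====
-- stated objective: alternative
-- what changed: Replaced A's independent index decoding (range(2**n) with bin()/zfill() and a per-bit string test for every i) by a stateful odometer: a boolean mask stepped in place like a binary counter, each genotype emitted from the previous state, with no arithmetic on an index and no binary-string construction.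
-- intended difference: On the empty string A returns a one-element list containing a plus sign (an artefact: bin of zero has one digit and zfill to width zero does not truncate it), while B returns a list containing the empty string - the single genotype over zero genes - which is the intended value. — e.g. on generate_genotypes(""): A returns ["+"], B returns [""]
import Mathlib
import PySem

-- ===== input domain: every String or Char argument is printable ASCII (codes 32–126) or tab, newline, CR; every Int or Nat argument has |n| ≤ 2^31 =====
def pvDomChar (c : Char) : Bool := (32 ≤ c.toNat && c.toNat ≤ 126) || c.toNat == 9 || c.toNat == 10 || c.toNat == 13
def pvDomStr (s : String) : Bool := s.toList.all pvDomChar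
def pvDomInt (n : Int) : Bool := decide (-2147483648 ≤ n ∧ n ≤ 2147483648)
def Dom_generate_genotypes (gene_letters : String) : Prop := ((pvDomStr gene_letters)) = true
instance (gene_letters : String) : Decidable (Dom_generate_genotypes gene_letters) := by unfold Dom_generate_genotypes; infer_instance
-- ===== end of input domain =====

-- B replaces A's index-decoding loop (bin/zfill/bit-test per index) by a stateful odometer
-- stepping a boolean mask in place like a binary counter; objective: alternative.

-- ===== PORT A =====
-- bin(n)[2:] for n > 0: most-significant bit first (empty for 0; binChars adds Python's '0')
def toBits : Nat → List Char
  | 0 => []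
  | n+1 => toBits ((n+1)/2) ++ [if (n+1) % 2 == 1 then '1' else '0']
decreasing_by exact Nat.div_lt_self (Nat.succ_pos n) (by norm_num)

-- bin(i)[2:]  (Python: bin(0)[2:] = "0")
def binChars (n : Nat) : List Char := if n = 0 then ['0'] else toBits n

-- ''.join(gene_letters[j] if bit == '1' else '+' for j, bit in enumerate(binary_repr))
-- (gene_letters[j] via pyGet?; the '+'-default is never taken: when bit = '1', j is in range)
def decodeA (cs bits : List Char) : List Char :=
  (PySem.List.enumerate bits).map
    (fun jb => if jb.2 = '1' then (PySem.List.pyGet? cs jb.1).getD '+' else '+')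

def generate_genotypes (gene_letters : String) : List String :=
  let cs := gene_letters.toList
  let n := cs.length
  (PySem.List.pyRange 0 (2^n : Nat) 1).map (fun i =>
    String.mk (decodeA cs (PySem.Chars.zfill (binChars i.toNat) (n : Int))))

-- ===== PORT B =====
-- ''.join(c if b else '+' for c, b in zip(gene_letters, bits))
def render (cs : List Char) (bits : List Bool) : List Char :=
  (cs.zip bits).map (fun p => if p.2 then p.1 else '+')

-- the inner while loop (scanning from the right = head of the reversed mask):
-- clear trailing set bits, set the first clear one; none = the counter rolled over (j < 0)
def stepR : List Bool → Option (List Bool)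
  | [] => none
  | b :: rest => if b then (stepR rest).map (false :: ·) else some (true :: rest)

-- the outer while True loop; fuel 2^n is exactly the number of emissions (totalization only)
def bLoop : Nat → List Char → List Bool → List String
  | 0, _, _ => []
  | f+1, cs, bits =>
      String.mk (render cs bits) ::
        (match stepR bits.reverse with
         | none => []
         | some nxtR => bLoop f cs nxtR.reverse)

def generate_genotypes_alt (gene_letters : String) : List String :=
  let cs := gene_letters.toList
  bLoop (2 ^ cs.length) cs (List.replicate cs.length false)

-- ===== PRECONDITION & SPEC =====
-- On the empty string A returns a one-element list containing a plus sign (an artefact: bin of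
-- zero has one digit and zfill to width zero does not truncate it), while B returns a list
-- containing the empty string — the single genotype over zero genes — the intended value.
def D_generate_genotypes (gene_letters : String) : Prop := gene_letters = ""
instance (gene_letters : String) : Decidable (D_generate_genotypes gene_letters) := by
  unfold D_generate_genotypes; infer_instance

def Spec_generate_genotypes (gene_letters : String) (out : List String) : Prop :=
  ¬ D_generate_genotypes gene_letters → out = generate_genotypes_alt gene_letters
instance (gene_letters : String) (out : List String) : Decidable (Spec_generate_genotypes gene_letters out) := by
  unfold Spec_generate_genotypes; infer_instance

def pvDiffWitness_generate_genotypes : String := ""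
def pvDiffWitnessOut_generate_genotypes : (List String) × (List String) := (["+"], [""])

-- ===== CLAIM (what is proved, stated in full; the proofs are below) =====
def Claim_unchanged_generate_genotypes : Prop := ∀ (gene_letters : String), Dom_generate_genotypes gene_letters → Spec_generate_genotypes gene_letters (generate_genotypes gene_letters)
def Claim_changed_generate_genotypes : Prop := Dom_generate_genotypes (pvDiffWitness_generate_genotypes) ∧ D_generate_genotypes (pvDiffWitness_generate_genotypes) ∧ generate_genotypes (pvDiffWitness_generate_genotypes) = pvDiffWitnessOut_generate_genotypes.1 ∧ generate_genotypes_alt (pvDiffWitness_generate_genotypes) = pvDiffWitnessOut_generate_genotypes.2 ∧ pvDiffWitnessOut_generate_genotypes.1 ≠ pvDiffWitnessOut_generate_genotypes.2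
def Claim_exact_generate_genotypes : Prop := ∀ (gene_letters : String), Dom_generate_genotypes gene_letters → D_generate_genotypes gene_letters → generate_genotypes gene_letters ≠ generate_genotypes_alt gene_letters

-- ===== LEMMAS AND PROOFS =====

-- the zero-padded binary numeral of k, width m (MSB first), as A's zfill produces it
def pad (m k : Nat) : List Char := List.replicate (m - (toBits k).length) '0' ++ toBits k

-- the width-n binary representation of k, least-significant bit first, as Booleans
def lbits : Nat → Nat → List Bool
  | 0, _ => []
  | n+1, k => (k % 2 == 1) :: lbits n (k/2)

theorem length_toBits_le (m : Nat) : ∀ k, k < 2^m → (toBits k).length ≤ m := by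
  induction m with
  | zero => intro k hk; interval_cases k; simp [toBits]
  | succ m ih =>
    intro k hk
    match k with
    | 0 => simp [toBits]
    | k+1 =>
      rw [toBits]
      have h2 : (k+1)/2 < 2^m := by
        have h2m : 2^(m+1) = 2^m * 2 := by ring
        omega
      have := ih ((k+1)/2) h2
      simp only [List.length_append, List.length_cons, List.length_nil]
      omega

theorem toBits_pos (n : Nat) (hn : 0 < n) :
    toBits n = toBits (n/2) ++ [if n % 2 == 1 then '1' else '0'] := by
  match n, hn with
  | n+1, _ => rw [toBits]

theorem mem_toBits (n : Nat) : ∀ c ∈ toBits n, c = '0' ∨ c = '1' := by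
  induction n using Nat.strong_induction_on with
  | _ n ih =>
    match n with
    | 0 => intro c hc; simp [toBits] at hc
    | n+1 =>
      intro c hc
      rw [toBits] at hc
      rcases List.mem_append.mp hc with h | h
      · exact ih ((n+1)/2) (Nat.div_lt_self (Nat.succ_pos n) (by norm_num)) c h
      · simp at h; split at h <;> simp [h]

theorem zfill_no_sign (c : Char) (rest : List Char) (w : Int)
    (h1 : c ≠ '+') (h2 : c ≠ '-') :
    PySem.Chars.zfill (c :: rest) w =
      List.replicate (w.toNat - (c :: rest).length) '0' ++ (c :: rest) := by
  unfold PySem.Chars.zfill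
  split
  · next hle =>
    have h0 : w.toNat - (c :: rest).length = 0 := by
      simp only [List.length_cons] at hle ⊢
      omega
    rw [h0]
    simp
  · simp [h1, h2]

theorem zfill_eq_pad (m k : Nat) (hm : 1 ≤ m) (hk : k < 2^m) :
    PySem.Chars.zfill (binChars k) (m : Int) = pad m k := by
  rcases Nat.eq_zero_or_pos k with hk0 | hk0
  · subst hk0
    rw [show binChars 0 = ['0'] from rfl, zfill_no_sign '0' [] (m : Int) (by decide) (by decide)]
    simp [pad, toBits]
    rw [show m = (m - 1) + 1 by omega, List.replicate_succ']
    simp [show m - 1 + 1 - 1 = m - 1 by omega]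
  · have hb : binChars k = toBits k := by simp [binChars]; omega
    obtain ⟨c, rest, hcr⟩ : ∃ c rest, toBits k = c :: rest := by
      match htk : toBits k with
      | [] =>
        exfalso
        rw [toBits_pos k hk0] at htk
        simp at htk
      | c :: rest => exact ⟨c, rest, rfl⟩
    have hc := mem_toBits k c (hcr ▸ List.mem_cons_self ..)
    rw [hb, hcr, zfill_no_sign c rest (m : Int)
      (by rcases hc with h | h <;> simp [h]) (by rcases hc with h | h <;> simp [h])]
    rw [pad, hcr]
    simp

theorem pad_length (m k : Nat) (hk : k < 2^m) : (pad m k).length = m := by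
  have := length_toBits_le m k hk
  simp [pad]; omega

theorem pad_step (m k : Nat) :
    pad m (k/2) ++ [if k % 2 == 1 then '1' else '0'] = pad (m+1) k := by
  rcases Nat.eq_zero_or_pos k with hk0 | hk0
  · subst hk0
    simp [pad, toBits, List.replicate_succ']
  · have h2 : toBits k = toBits (k/2) ++ [if k % 2 == 1 then '1' else '0'] := toBits_pos k hk0
    rw [pad, pad, h2]
    simp only [List.length_append, List.length_cons, List.length_nil]
    rw [show m + 1 - ((toBits (k/2)).length + (0+1)) = m - (toBits (k/2)).length by omega]
    simp [List.append_assoc]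

-- the MSB-first numeral that A decodes and the reversed LSB-first mask of B are the same word
theorem pad_map_lbits (n : Nat) : ∀ k, k < 2^n →
    (pad n k).map (fun c => c == '1') = (lbits n k).reverse := by
  induction n with
  | zero =>
    intro k hk
    interval_cases k
    simp [pad, toBits, lbits]
  | succ n ih =>
    intro k hk
    have hk2 : k/2 < 2^n := by
      have : 2^(n+1) = 2^n * 2 := by ring
      omega
    rw [← pad_step n k, List.map_append, ih (k/2) hk2]
    simp only [lbits, List.reverse_cons]
    congr 1
    simp only [List.map_cons, List.map_nil]
    congr 1
    by_cases h : k % 2 = 1 <;> simp [h]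

theorem lbits_zero (n : Nat) : lbits n 0 = List.replicate n false := by
  induction n with
  | zero => rfl
  | succ n ih => simp [lbits, ih, List.replicate_succ]

-- the odometer step is the successor on the LSB-first numeral, none at rollover
theorem stepR_lbits (n : Nat) : ∀ k, k < 2^n →
    stepR (lbits n k) = if k+1 < 2^n then some (lbits n (k+1)) else none := by
  induction n with
  | zero =>
    intro k hk
    interval_cases k
    simp [lbits, stepR]
  | succ n ih =>
    intro k hk
    have hpow : 2^(n+1) = 2^n * 2 := by ring
    by_cases hpar : k % 2 = 1
    · have hk2 : k/2 < 2^n := by omega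
      have h1 : (k % 2 == 1) = true := by simp [hpar]
      rw [lbits, h1]
      simp only [stepR, if_pos]
      rw [ih (k/2) hk2]
      by_cases hlt : k + 1 < 2^(n+1)
      · have hlt2 : k/2 + 1 < 2^n := by omega
        rw [if_pos hlt2, if_pos hlt]
        have e1 : (k+1) % 2 = 0 := by omega
        have e2 : (k+1)/2 = k/2 + 1 := by omega
        simp [lbits, e1, e2]
      · have hlt2 : ¬ (k/2 + 1 < 2^n) := by omega
        rw [if_neg hlt2, if_neg hlt]
        rfl
    · have h1 : (k % 2 == 1) = false := by simp [Nat.mod_two_ne_one.mp hpar]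
      rw [lbits, h1]
      simp only [stepR]
      rw [if_neg (by decide : ¬ (false = true))]
      have hlt : k + 1 < 2^(n+1) := by omega
      rw [if_pos hlt]
      have e1 : (k+1) % 2 = 1 := by omega
      have e2 : (k+1)/2 = k/2 := by omega
      simp [lbits, e1, e2]

-- A's per-index decode and B's mask rendering agree letter by letter
theorem decodeA_shift (c : Char) (cs : List Char) (bits : List Char) (s : Nat) :
    (PySem.List.enumerate bits ((s : Int) + 1)).map
      (fun jb => if jb.2 = '1' then (PySem.List.pyGet? (c :: cs) jb.1).getD '+' else '+')
    = (PySem.List.enumerate bits (s : Int)).map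
      (fun jb => if jb.2 = '1' then (PySem.List.pyGet? cs jb.1).getD '+' else '+') := by
  induction bits generalizing s with
  | nil => simp [PySem.List.enumerate]
  | cons b rest ih =>
    simp only [PySem.List.enumerate, List.map_cons]
    congr 1
    · have h1 : ((s : Int) + 1) = ((s + 1 : Nat) : Int) := by push_cast; ring
      rw [h1, PySem.List.pyGet?_natCast, PySem.List.pyGet?_natCast]
      simp
    · have h2 : ((s : Int) + 1 + 1) = ((s + 1 : Nat) : Int) + 1 := by push_cast; ring
      rw [h2, ih (s+1)]
      have h3 : ((s + 1 : Nat) : Int) = (s : Int) + 1 := by push_cast; ring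
      rw [h3]

theorem decodeA_cons (c b : Char) (cs bits : List Char) :
    decodeA (c :: cs) (b :: bits) = (if b = '1' then c else '+') :: decodeA cs bits := by
  simp only [decodeA, PySem.List.enumerate, List.map_cons]
  congr 1
  · by_cases hb : b = '1'
    · simp [hb]
    · simp [hb]
  · have h := decodeA_shift c cs bits 0
    simpa using h

theorem decodeA_render : ∀ (cs bits : List Char), bits.length = cs.length →
    decodeA cs bits = render cs (bits.map (fun c => c == '1')) := by
  intro cs
  induction cs with
  | nil =>
    intro bits hlen
    have : bits = [] := List.eq_nil_of_length_eq_zero (by simpa using hlen)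
    subst this
    simp [decodeA, PySem.List.enumerate, render]
  | cons c cs ih =>
    intro bits hlen
    match bits with
    | b :: bs =>
      rw [decodeA_cons]
      simp only [List.map_cons, render, List.zip_cons_cons, List.map_cons]
      congr 1
      · by_cases hb : b = '1' <;> simp [hb]
      · have := ih bs (by simpa using hlen)
        simpa [render] using this

-- the odometer loop enumerates exactly the masks of k, k+1, …, 2^n - 1
theorem bLoop_eq (cs : List Char) : ∀ f n k, k < 2^n → f = 2^n - k →
    bLoop f cs ((lbits n k).reverse) =
      (List.range' k (2^n - k)).map
        (fun i => String.mk (render cs ((lbits n i).reverse))) := by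
  intro f
  induction f with
  | zero => intro n k hk hf; omega
  | succ f ih =>
    intro n k hk hf
    rw [bLoop]
    rw [List.reverse_reverse, stepR_lbits n k hk]
    by_cases hlt : k + 1 < 2^n
    · rw [if_pos hlt]
      simp only
      rw [ih n (k+1) hlt (by omega)]
      rw [show 2^n - k = (2^n - (k+1)) + 1 by omega, List.range'_succ, List.map_cons]
    · rw [if_neg hlt]
      have hk1 : 2^n - k = 1 := by omega
      rw [hk1]
      simp [List.range'_one]

-- ===== VERDICT (by name: the statement is the Claim_ definition above) =====
theorem generate_genotypes_spec : Claim_unchanged_generate_genotypes := by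
  intro s _dom hD
  have hne : s.toList ≠ [] := by
    intro h
    exact hD (String.toList_inj.mp (by simpa using h))
  have hn1 : 1 ≤ s.toList.length := by
    cases h : s.toList with
    | nil => exact absurd h hne
    | cons a l => simp
  show generate_genotypes s = generate_genotypes_alt s
  simp only [generate_genotypes, generate_genotypes_alt]
  rw [show List.replicate s.toList.length false = (lbits s.toList.length 0).reverse by
        simp [lbits_zero]]
  rw [bLoop_eq s.toList (2 ^ s.toList.length) s.toList.length 0 (Nat.two_pow_pos _) (Nat.sub_zero _).symm]
  simp only [PySem.List.pyRange_zero_nat, List.map_map, Nat.sub_zero,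
    ← List.range_eq_range']
  apply List.map_congr_left
  intro k hk
  have hk' : k < 2 ^ s.toList.length := List.mem_range.mp hk
  simp only [Function.comp, Int.toNat_natCast]
  rw [zfill_eq_pad s.toList.length k hn1 hk',
    decodeA_render s.toList (pad s.toList.length k) (pad_length s.toList.length k hk'),
    pad_map_lbits s.toList.length k hk']

theorem generate_genotypes_changed : Claim_changed_generate_genotypes := by
  unfold Claim_changed_generate_genotypes; decide

theorem generate_genotypes_tight : Claim_exact_generate_genotypes := by
  intro s _ hD
  subst hD
  decide
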